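-- pv_equiv track=rewrite | github.com/RIHELO/ulam-spiral | plot_ulam.py | generate_clockwise_spiral_coords
-- ===== SOURCE A (Python) =====
-- def generate_clockwise_spiral_coords(num, n):
--     coords = {}
--     x, y = 0, 0
--     coords[(x, y)] = num
--     num += 1
--     layer = 1
--
--     while num <= n:
--         # UP
--         y += 1
--         coords[(x, y)] = num
--         num += 1
--         if num > n:
--             return coords
--
--         # RIGHT
--         for _ in range(layer):
--             x += 1
--             coords[(x, y)] = num
--             num += 1
--             if num > n:
--                 return coords
--
--         # DOWN
--         for _ in range(layer):
--             y -= 1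
--             coords[(x, y)] = num
--             num += 1
--             if num > n:
--                 return coords
--
--         y = layer
--         layer += 1
--         x = 0
--
--     return coords
-- ===== SOURCE B (Python) =====
-- def generate_clockwise_spiral_coords(num, n):
--     # Closed-form generation: entry i (0-based) lives in layer L = isqrt(i),
--     # at offset j = i - L*L along the up/right/down walk of that layer.
--     count = max(1, n - num + 1)
--     coords = {}
--     side = 0
--     for i in range(count):
--         if i == (side + 1) * (side + 1):
--             side += 1
--         j = i - side * side
--         if j <= side:
--             coords[(j, side)] = num + i
--         else:
--             coords[(side, 2 * side - j)] = num + i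
--     return coords
-- ===== Notes on version B (the rewrite author's own statement) =====
-- stated objective: alternative
-- what changed: B replaces A's stateful spiral walk (x/y cursor, per-direction loops with early-return bound checks) by a closed-form index formula: entry i lies in layer L=isqrt(i) at offset j=i-L*L, giving coordinate (j,L) or (L,2L-j) in one uniform loop over range(max(1,n-num+1)).
import Mathlib
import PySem

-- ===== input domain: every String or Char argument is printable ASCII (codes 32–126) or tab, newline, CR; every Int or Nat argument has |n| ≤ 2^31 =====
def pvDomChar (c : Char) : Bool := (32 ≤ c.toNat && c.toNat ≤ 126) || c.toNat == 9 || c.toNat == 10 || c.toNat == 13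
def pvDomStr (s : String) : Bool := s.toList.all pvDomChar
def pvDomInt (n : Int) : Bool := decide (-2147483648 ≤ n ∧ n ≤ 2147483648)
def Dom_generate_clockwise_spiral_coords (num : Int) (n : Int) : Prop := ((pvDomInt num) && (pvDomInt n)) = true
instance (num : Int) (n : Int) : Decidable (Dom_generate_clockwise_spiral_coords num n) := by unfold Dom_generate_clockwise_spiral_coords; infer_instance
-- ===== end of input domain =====

-- B replaces A's stateful spiral walk by a closed-form per-index layer formula (same cost, different algorithm).

-- ===== PORT A =====
-- A's RIGHT for-loop: for _ in range(layer): x += 1; coords[(x,y)] = num; num += 1; if num > n: return coords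
-- .inl = early "return coords", .inr = fall through with (coords, x, num) (y unchanged).
def aRight (n : Int) : Nat → PySem.Dict (Int × Int) Int → Int → Int → Int →
    (PySem.Dict (Int × Int) Int) ⊕ (PySem.Dict (Int × Int) Int × Int × Int)
  | 0, coords, x, _, num => .inr (coords, x, num)
  | k+1, coords, x, y, num =>
    let x := x + 1
    let coords := coords.insert (x, y) num
    let num := num + 1
    if num > n then .inl coords else aRight n k coords x y num

-- A's DOWN for-loop: for _ in range(layer): y -= 1; coords[(x,y)] = num; num += 1; if num > n: return coords
def aDown (n : Int) : Nat → PySem.Dict (Int × Int) Int → Int → Int → Int →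
    (PySem.Dict (Int × Int) Int) ⊕ (PySem.Dict (Int × Int) Int × Int × Int)
  | 0, coords, _, y, num => .inr (coords, y, num)
  | k+1, coords, x, y, num =>
    let y := y - 1
    let coords := coords.insert (x, y) num
    let num := num + 1
    if num > n then .inl coords else aDown n k coords x y num

-- A's while loop; fuel only makes it total (num strictly increases every iteration,
-- so fuel = (n - num + 1).toNat at entry never runs out while num ≤ n).
def aLoop (n : Int) : Nat → PySem.Dict (Int × Int) Int → Int → Int → Int → Int →
    PySem.Dict (Int × Int) Int
  | fuel, coords, x, y, num, layer =>
    if num > n then coords else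
    match fuel with
    | 0 => coords  -- unreachable with the fuel supplied at the call site
    | fuel + 1 =>
      -- UP
      let y := y + 1
      let coords := coords.insert (x, y) num
      let num := num + 1
      if num > n then coords else
      match aRight n layer.toNat coords x y num with
      | .inl c => c
      | .inr (coords, x, num) =>
        match aDown n layer.toNat coords x y num with
        | .inl c => c
        | .inr (coords, _, num) =>
          -- y = layer; layer += 1; x = 0
          aLoop n fuel coords 0 layer num (layer + 1)

def generate_clockwise_spiral_coords (num : Int) (n : Int) : List (Int × Int × Int) :=
  let coords : PySem.Dict (Int × Int) Int := (PySem.Dict.empty).insert (0, 0) num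
  let num := num + 1
  (aLoop n (n - num + 1).toNat coords 0 0 num 1).items.map (fun p => (p.1.1, p.1.2, p.2))

-- ===== PORT B =====
-- one loop body of B: bump side at the layer boundary, then place entry i by the closed form
def bStep (num : Int) (st : PySem.Dict (Int × Int) Int × Int) (i : Int) :
    PySem.Dict (Int × Int) Int × Int :=
  let side := if i = (st.2 + 1) * (st.2 + 1) then st.2 + 1 else st.2
  let j := i - side * side
  let coords := if j ≤ side then st.1.insert (j, side) (num + i)
                else st.1.insert (side, 2 * side - j) (num + i)
  (coords, side)

def generate_clockwise_spiral_coords_alt (num : Int) (n : Int) : List (Int × Int × Int) :=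
  let count := max 1 (n - num + 1)
  let res := (PySem.List.pyRange 0 count 1).foldl (bStep num) (PySem.Dict.empty, 0)
  res.1.items.map (fun p => (p.1.1, p.1.2, p.2))

-- ===== PRECONDITION & SPEC =====
def Spec_generate_clockwise_spiral_coords (num : Int) (n : Int) (out : List (Int × Int × Int)) : Prop := out = generate_clockwise_spiral_coords_alt num n
instance (num : Int) (n : Int) (out : List (Int × Int × Int)) : Decidable (Spec_generate_clockwise_spiral_coords num n out) := by unfold Spec_generate_clockwise_spiral_coords; infer_instance

-- ===== CLAIM (what is proved, stated in full; the proofs are below) =====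
def Claim_equal_generate_clockwise_spiral_coords : Prop := ∀ (num : Int) (n : Int), Dom_generate_clockwise_spiral_coords num n → Spec_generate_clockwise_spiral_coords num n (generate_clockwise_spiral_coords num n)

-- ===== LEMMAS AND PROOFS =====

-- the coordinate of the i-th spiral entry (0-based), in closed form
def encN (i : Nat) : Int × Int :=
  let L : Int := Nat.sqrt i
  let j : Int := (i : Int) - L * L
  if j ≤ L then (j, L) else (L, 2 * L - j)

-- the first c entries of the spiral, as the items list both dicts build
def specPairs (num0 : Int) (c : Nat) : List ((Int × Int) × Int) :=
  (List.range c).map (fun i => (encN i, num0 + i))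

theorem specPairs_succ (num0 : Int) (c : Nat) :
    specPairs num0 (c + 1) = specPairs num0 c ++ [(encN c, num0 + c)] := by
  simp [specPairs, List.range_succ]

theorem encN_inj : Function.Injective encN := by
  intro a b h
  have ha1 := Nat.sqrt_le a; have ha2 := Nat.lt_succ_sqrt a
  have hb1 := Nat.sqrt_le b; have hb2 := Nat.lt_succ_sqrt b
  simp only [encN, Prod.ext_iff] at h
  split_ifs at h <;> obtain ⟨h1, h2⟩ := h <;>
    · have ha1' : (Nat.sqrt a * Nat.sqrt a : Int) ≤ a := by exact_mod_cast ha1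
      have ha2' : (a : Int) < (Nat.sqrt a + 1) * (Nat.sqrt a + 1) := by exact_mod_cast ha2
      have hb1' : (Nat.sqrt b * Nat.sqrt b : Int) ≤ b := by exact_mod_cast hb1
      have hb2' : (b : Int) < (Nat.sqrt b + 1) * (Nat.sqrt b + 1) := by exact_mod_cast hb2
      have : (a : Int) = b := by push_cast at h1 h2 ha1' ha2' hb1' hb2' ⊢; nlinarith
      exact_mod_cast this

theorem specDict_not_contains (num0 : Int) (c i : Nat) (hc : c ≤ i) :
    (PySem.Dict.mk (specPairs num0 c)).contains (encN i) = false := by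
  rw [PySem.Dict.contains_mk, List.any_eq_false]
  intro p hp
  simp only [specPairs, List.mem_map, List.mem_range] at hp
  obtain ⟨k, hk, rfl⟩ := hp
  intro hke
  have := encN_inj (beq_iff_eq.mp hke)
  omega

theorem specDict_insert (num0 : Int) (c : Nat) (v : Int) :
    (PySem.Dict.mk (specPairs num0 c)).insert (encN c) v
      = PySem.Dict.mk (specPairs num0 c ++ [(encN c, v)]) := by
  apply PySem.Dict.ext
  rw [PySem.Dict.items_insert_of_not_contains _ v (specDict_not_contains num0 c c le_rfl)]

-- entry i = L*L + t of the spiral, split by which leg of layer L it is on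
theorem sqrt_offset (L t : Nat) (ht : t ≤ 2 * L) : Nat.sqrt (L * L + t) = L := by
  have h1 : L ≤ Nat.sqrt (L * L + t) := Nat.le_sqrt.mpr (by omega)
  have h2 : Nat.sqrt (L * L + t) < L + 1 := Nat.sqrt_lt.mpr (by nlinarith)
  omega

theorem encN_eq_up (L t i : Nat) (hi : i = L * L + t) (ht : t ≤ L) :
    encN i = ((t : Int), (L : Int)) := by
  subst hi
  have hs := sqrt_offset L t (by omega)
  simp only [encN, hs]
  have he : ((L * L + t : Nat) : Int) - (L : Int) * L = t := by push_cast; ring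
  rw [he, if_pos (by exact_mod_cast ht)]

theorem encN_eq_down (L t i : Nat) (hi : i = L * L + t) (h1 : L < t) (h2 : t ≤ 2 * L) :
    encN i = ((L : Int), (L : Int) - ((t - L : Nat) : Int)) := by
  subst hi
  have hs := sqrt_offset L t h2
  simp only [encN, hs]
  have he : ((L * L + t : Nat) : Int) - (L : Int) * L = t := by push_cast; ring
  rw [he, if_neg (by exact_mod_cast Nat.not_le.mpr h1)]
  have h3 : ((t - L : Nat) : Int) = (t : Int) - L := by omega
  rw [h3, Prod.mk.injEq]; exact ⟨by ring, by ring⟩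

-- ---- A-side characterisation: the RIGHT leg ----
theorem aRight_spec (n num0 : Int) (L : Nat) : ∀ (k t : Nat), t + k = L →
    ((L * L + 1 + t : Nat) : Int) ≤ n - num0 →
    aRight n k (PySem.Dict.mk (specPairs num0 (L * L + 1 + t))) (t : Int) (L : Int)
      (num0 + ((L * L + 1 + t : Nat) : Int)) =
      (if ((L * L + 1 + t + k : Nat) : Int) ≤ n - num0
       then .inr (PySem.Dict.mk (specPairs num0 (L * L + 1 + t + k)), ((t + k : Nat) : Int),
                  num0 + ((L * L + 1 + t + k : Nat) : Int))
       else .inl (PySem.Dict.mk (specPairs num0 (n - num0 + 1).toNat))) := by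
  intro k
  induction k with
  | zero =>
    intro t ht hm
    simp only [Nat.add_zero]
    rw [if_pos hm]
    simp [aRight]
  | succ k ih =>
    intro t ht hm
    have hkey : ((t : Int) + 1, (L : Int)) = encN (L * L + 1 + t) := by
      rw [encN_eq_up L (t + 1) (L * L + 1 + t) (by omega) (by omega)]
      push_cast; ring_nf
    simp only [aRight]
    rw [hkey, specDict_insert num0 (L * L + 1 + t), ← specPairs_succ]
    by_cases hstop : num0 + ((L * L + 1 + t : Nat) : Int) + 1 > n
    · rw [if_pos hstop, if_neg (by push_cast at hstop ⊢; omega)]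
      have hEq : L * L + 1 + t + 1 = (n - num0 + 1).toNat := by
        push_cast at hm hstop; omega
      rw [hEq]
    · rw [if_neg hstop]
      have H := ih (t + 1) (by omega) (by push_cast at hstop ⊢; omega)
      rw [show L * L + 1 + (t + 1) + k = L * L + 1 + t + (k + 1) by omega,
          show t + 1 + k = t + (k + 1) by omega] at H
      rw [show ((t : Int) + 1) = ((t + 1 : Nat) : Int) by push_cast; ring,
          show num0 + ((L * L + 1 + t : Nat) : Int) + 1
             = num0 + ((L * L + 1 + (t + 1) : Nat) : Int) by push_cast; ring,
          show L * L + 1 + t + 1 = L * L + 1 + (t + 1) by omega]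
      rw [H]

-- ---- A-side characterisation: the DOWN leg ----
theorem aDown_spec (n num0 : Int) (L : Nat) : ∀ (k t : Nat), t + k = L →
    ((L * L + L + 1 + t : Nat) : Int) ≤ n - num0 →
    aDown n k (PySem.Dict.mk (specPairs num0 (L * L + L + 1 + t))) (L : Int)
      ((L : Int) - (t : Int))
      (num0 + ((L * L + L + 1 + t : Nat) : Int)) =
      (if ((L * L + L + 1 + t + k : Nat) : Int) ≤ n - num0
       then .inr (PySem.Dict.mk (specPairs num0 (L * L + L + 1 + t + k)),
                  (L : Int) - ((t + k : Nat) : Int),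
                  num0 + ((L * L + L + 1 + t + k : Nat) : Int))
       else .inl (PySem.Dict.mk (specPairs num0 (n - num0 + 1).toNat))) := by
  intro k
  induction k with
  | zero =>
    intro t ht hm
    simp only [Nat.add_zero]
    rw [if_pos hm]
    simp [aDown]
  | succ k ih =>
    intro t ht hm
    have hkey : ((L : Int), (L : Int) - (t : Int) - 1) = encN (L * L + L + 1 + t) := by
      rw [encN_eq_down L (L + 1 + t) (L * L + L + 1 + t) (by omega) (by omega) (by omega)]
      have h3 : ((L + 1 + t - L : Nat) : Int) = (t : Int) + 1 := by omega
      rw [h3, Prod.mk.injEq]; exact ⟨by ring, by ring⟩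
    simp only [aDown]
    rw [hkey, specDict_insert num0 (L * L + L + 1 + t), ← specPairs_succ]
    by_cases hstop : num0 + ((L * L + L + 1 + t : Nat) : Int) + 1 > n
    · rw [if_pos hstop, if_neg (by push_cast at hstop ⊢; omega)]
      have hEq : L * L + L + 1 + t + 1 = (n - num0 + 1).toNat := by
        push_cast at hm hstop; omega
      rw [hEq]
    · rw [if_neg hstop]
      have H := ih (t + 1) (by omega) (by push_cast at hstop ⊢; omega)
      rw [show L * L + L + 1 + (t + 1) + k = L * L + L + 1 + t + (k + 1) by omega,
          show t + 1 + k = t + (k + 1) by omega] at H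
      rw [show ((L : Int) - (t : Int) - 1) = (L : Int) - ((t + 1 : Nat) : Int) by push_cast; ring,
          show num0 + ((L * L + L + 1 + t : Nat) : Int) + 1
             = num0 + ((L * L + L + 1 + (t + 1) : Nat) : Int) by push_cast; ring,
          show L * L + L + 1 + t + 1 = L * L + L + 1 + (t + 1) by omega]
      rw [H]

-- ---- A-side characterisation: the while loop ----
theorem aLoop_spec (n num0 : Int) : ∀ (fuel : Nat) (L : Nat), 1 ≤ L →
    (n - num0 - ((L * L : Nat) : Int) + 1).toNat ≤ fuel →
    aLoop n fuel (PySem.Dict.mk (specPairs num0 (L * L))) 0 ((L : Int) - 1)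
      (num0 + ((L * L : Nat) : Int)) (L : Int) =
      (if ((L * L : Nat) : Int) ≤ n - num0
       then PySem.Dict.mk (specPairs num0 (n - num0 + 1).toNat)
       else PySem.Dict.mk (specPairs num0 (L * L))) := by
  intro fuel
  induction fuel with
  | zero =>
    intro L hL hfuel
    have hgt : num0 + ((L * L : Nat) : Int) > n := by omega
    rw [if_neg (by omega)]
    simp only [aLoop, if_pos hgt]
  | succ fuel ih =>
    intro L hL hfuel
    by_cases htop : num0 + ((L * L : Nat) : Int) > n
    · rw [if_neg (by omega)]
      simp only [aLoop, if_pos htop]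
    · rw [if_pos (by omega)]
      simp only [aLoop, if_neg htop]
      -- UP writes entry L*L at (0, L)
      have hkey : ((0 : Int), (L : Int) - 1 + 1) = encN (L * L) := by
        rw [encN_eq_up L 0 (L * L) (by omega) (by omega)]
        norm_num
      rw [hkey, specDict_insert num0 (L * L), ← specPairs_succ]
      by_cases hs1 : num0 + ((L * L : Nat) : Int) + 1 > n
      · rw [if_pos hs1]
        have hEq : L * L + 1 = (n - num0 + 1).toNat := by push_cast at htop hs1 ⊢; omega
        rw [hEq]
      · rw [if_neg hs1]
        rw [show (L : Int) - 1 + 1 = (L : Int) by ring]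
        have hLt : ((L : Int)).toNat = L := by simp
        have HR := aRight_spec n num0 L L 0 (by omega) (by push_cast at hs1 ⊢; omega)
        rw [show L * L + 1 + 0 = L * L + 1 by omega, show ((0 : Nat) : Int) = (0 : Int) by norm_num,
            show 0 + L = L by omega] at HR
        rw [show num0 + ((L * L : Nat) : Int) + 1 = num0 + ((L * L + 1 : Nat) : Int) by push_cast; ring,
            hLt, HR]
        by_cases hr1 : ((L * L + 1 + L : Nat) : Int) ≤ n - num0
        · rw [if_pos hr1]
          dsimp only
          have HD := aDown_spec n num0 L L 0 (by omega)
            (by rw [show L * L + L + 1 + 0 = L * L + 1 + L by omega]; exact hr1)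
          rw [show L * L + L + 1 + 0 + L = L * L + 1 + L + L by omega,
              show L * L + L + 1 + 0 = L * L + 1 + L by omega,
              show ((0 : Nat) : Int) = (0 : Int) by norm_num,
              show (L : Int) - 0 = (L : Int) by ring,
              show 0 + L = L by omega] at HD
          rw [HD]
          by_cases hd1 : ((L * L + 1 + L + L : Nat) : Int) ≤ n - num0
          · rw [if_pos hd1]
            dsimp only
            have IH := ih (L + 1) (by omega)
              (by rw [show ((((L + 1) * (L + 1) : Nat)) : Int)
                        = (((L * L : Nat)) : Int) + 2 * (L : Int) + 1 by push_cast; ring]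
                  omega)
            rw [show (L + 1) * (L + 1) = L * L + 1 + L + L by ring,
                show (((L + 1 : Nat)) : Int) = (L : Int) + 1 by push_cast; ring,
                show (L : Int) + 1 - 1 = (L : Int) by ring] at IH
            rw [IH, if_pos hd1]
          · rw [if_neg hd1]
        · rw [if_neg hr1]

-- ---- B-side characterisation: the closed-form fold ----
theorem bFold_spec (num0 : Int) : ∀ (c : Nat),
    (List.range c).foldl (fun st (k : Nat) => bStep num0 st ((0 : Int) + k)) (PySem.Dict.empty, 0)
      = (PySem.Dict.mk (specPairs num0 c), (Nat.sqrt (c - 1) : Int)) := by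
  intro c
  induction c with
  | zero =>
    simp [specPairs]
    rfl
  | succ c ih =>
    rw [List.range_succ, List.foldl_append, ih]
    simp only [List.foldl_cons, List.foldl_nil]
    have hside : (if ((0 : Int) + (c : Int)) = ((Nat.sqrt (c - 1) : Int) + 1) * ((Nat.sqrt (c - 1) : Int) + 1)
          then (Nat.sqrt (c - 1) : Int) + 1 else (Nat.sqrt (c - 1) : Int))
        = (Nat.sqrt c : Int) := by
      rcases Nat.eq_zero_or_pos c with hc0 | hc0
      · subst hc0; norm_num
      · obtain ⟨c', rfl⟩ : ∃ c', c = c' + 1 := ⟨c - 1, by omega⟩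
        rw [show c' + 1 - 1 = c' by omega]
        have h1 := Nat.sqrt_le c'
        have h2 : c' < (Nat.sqrt c' + 1) * (Nat.sqrt c' + 1) := Nat.lt_succ_sqrt c'
        by_cases heq : c' + 1 = (Nat.sqrt c' + 1) * (Nat.sqrt c' + 1)
        · rw [if_pos (by push_cast [heq]; ring), heq, Nat.sqrt_eq]
          push_cast; ring
        · have hlo : Nat.sqrt c' ≤ Nat.sqrt (c' + 1) := Nat.le_sqrt.mpr (by omega)
          have hhi : Nat.sqrt (c' + 1) < Nat.sqrt c' + 1 := Nat.sqrt_lt.mpr (by omega)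
          rw [if_neg (by
            intro h
            rw [show ((0 : Int) + ((c' + 1 : Nat) : Int)) = (((c' + 1 : Nat)) : Int) by ring] at h
            exact heq (by exact_mod_cast h))]
          congr 1; omega
    simp only [bStep, hside]
    have h1 := Nat.sqrt_le c
    have h2 : c < (Nat.sqrt c + 1) * (Nat.sqrt c + 1) := Nat.lt_succ_sqrt c
    have hj : (0 : Int) + (c : Int) - (Nat.sqrt c : Int) * (Nat.sqrt c : Int)
        = ((c - Nat.sqrt c * Nat.sqrt c : Nat) : Int) := by omega
    rw [show (c - 1).sqrt = Nat.sqrt (c - 1) from rfl] at *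
    rw [hj]
    by_cases hb : ((c - Nat.sqrt c * Nat.sqrt c : Nat) : Int) ≤ (Nat.sqrt c : Int)
    · rw [if_pos hb]
      have hkey : (((c - Nat.sqrt c * Nat.sqrt c : Nat) : Int), (Nat.sqrt c : Int)) = encN c := by
        rw [encN_eq_up (Nat.sqrt c) (c - Nat.sqrt c * Nat.sqrt c) c (by omega) (by exact_mod_cast hb)]
      rw [hkey, show (0 : Int) + (c : Int) = ((c : Nat) : Int) by ring,
          specDict_insert num0 c, ← specPairs_succ, Prod.mk.injEq]
      exact ⟨rfl, by rw [show c + 1 - 1 = c by omega]⟩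
    · rw [if_neg hb]
      have hble : Nat.sqrt c < c - Nat.sqrt c * Nat.sqrt c := by push_cast at hb; omega
      have hkey : ((Nat.sqrt c : Int), 2 * (Nat.sqrt c : Int) - ((c - Nat.sqrt c * Nat.sqrt c : Nat) : Int))
          = encN c := by
        rw [encN_eq_down (Nat.sqrt c) (c - Nat.sqrt c * Nat.sqrt c) c (by omega) hble
              (by have h2' : c < Nat.sqrt c * Nat.sqrt c + 2 * Nat.sqrt c + 1 := by nlinarith
                  omega)]
        have h3 : ((c - Nat.sqrt c * Nat.sqrt c - Nat.sqrt c : Nat) : Int)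
            = ((c - Nat.sqrt c * Nat.sqrt c : Nat) : Int) - (Nat.sqrt c : Int) := by omega
        rw [h3, Prod.mk.injEq]; exact ⟨by ring, by ring⟩
      rw [hkey, show (0 : Int) + (c : Int) = ((c : Nat) : Int) by ring,
          specDict_insert num0 c, ← specPairs_succ, Prod.mk.injEq]
      exact ⟨rfl, by rw [show c + 1 - 1 = c by omega]⟩

-- ===== VERDICT (by name: the statement is the Claim_ definition above) =====
theorem generate_clockwise_spiral_coords_spec : Claim_equal_generate_clockwise_spiral_coords := by
  unfold Claim_equal_generate_clockwise_spiral_coords Spec_generate_clockwise_spiral_coords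
  intro num0 n _
  unfold generate_clockwise_spiral_coords generate_clockwise_spiral_coords_alt
  simp only [PySem.List.pyRange_one]
  rw [show ((max 1 (n - num0 + 1)) - 0) = max 1 (n - num0 + 1) by ring,
      List.foldl_map, bFold_spec num0 (max 1 (n - num0 + 1)).toNat]
  have hinit : (PySem.Dict.empty : PySem.Dict (Int × Int) Int).insert (0, 0) num0
      = PySem.Dict.mk (specPairs num0 1) := by
    apply PySem.Dict.ext
    rw [PySem.Dict.items_insert_of_not_contains _ num0 (by rw [PySem.Dict.contains_empty])]
    rw [show ((0 : Int), (0 : Int)) = encN 0 by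
          rw [encN_eq_up 0 0 0 (by omega) (by omega)]; norm_num]
    simp [specPairs]
    rfl
  rw [hinit]
  have H := aLoop_spec n num0 (n - (num0 + 1) + 1).toNat 1 (by omega) (by push_cast; omega)
  rw [show (1 * 1 : Nat) = 1 by omega, show (((1 : Nat)) : Int) = (1 : Int) by norm_num,
      show (1 : Int) - 1 = 0 by norm_num] at H
  rw [H]
  by_cases hc : (1 : Int) ≤ n - num0
  · rw [if_pos hc, show (max 1 (n - num0 + 1)) = n - num0 + 1 by omega]
  · rw [if_neg hc]
    have : (max 1 (n - num0 + 1)).toNat = 1 := by omega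
    rw [this]
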